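-- pv_equiv track=rewrite | github.com/addherbs/LeetCode | Explore_Google/Longest Palindromic Substring.py | expandAroundCenter
-- ===== SOURCE A (Python) =====
-- def expandAroundCenter(s, n, left, right):
--     ans = 0
--
--     while left > -1 and right < n:
--         if s[left] == s[right]:
--             ans = right - left + 1
--             left -= 1
--             right += 1
--         else: break
--
--     return ans
-- ===== SOURCE B (Python) =====
-- def expandAroundCenter(s, n, left, right):
--     if left < 0 or right >= n:
--         return 0
--     rmax = min(left, n - 1 - right)
--     for r in range(rmax, -1, -1):
--         if all(s[left - j] == s[right + j] for j in range(r + 1)):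
--             return right - left + 1 + 2 * r
--     return 0
-- ===== Notes on version B (the rewrite author's own statement) =====
-- stated objective: alternative
-- what changed: Replaces A's single outward expand loop with mutable state by a generate-and-test search: compute the maximal radius rmax = min(left, n-1-right) and scan r downward, returning right-left+1+2*r for the first radius whose symmetric character pairs all match.
-- outside the precondition, e.g. on expandAroundCenter('ab', 5, 0, 1): A returns 0, B returns 0; on expandAroundCenter('aa', 5, 0, 1): A returns 2, B returns 2
import Mathlib
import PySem

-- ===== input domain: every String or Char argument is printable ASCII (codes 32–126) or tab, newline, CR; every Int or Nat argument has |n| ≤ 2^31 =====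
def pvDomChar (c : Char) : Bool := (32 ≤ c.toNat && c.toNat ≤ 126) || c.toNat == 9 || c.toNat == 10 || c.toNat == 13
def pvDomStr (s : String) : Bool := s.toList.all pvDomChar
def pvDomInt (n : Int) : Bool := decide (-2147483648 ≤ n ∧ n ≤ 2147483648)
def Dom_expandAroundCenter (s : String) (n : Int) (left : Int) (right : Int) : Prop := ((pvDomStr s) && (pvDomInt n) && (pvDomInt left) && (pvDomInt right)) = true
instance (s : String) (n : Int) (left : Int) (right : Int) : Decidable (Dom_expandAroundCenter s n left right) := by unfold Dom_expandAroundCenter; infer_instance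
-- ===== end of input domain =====

-- B replaces A's single outward expand loop by a descending generate-and-test over candidate
-- radii (alternative decomposition, not claimed faster).

-- ===== PORT A =====
-- while left > -1 and right < n: if s[left] == s[right]: ans = right-left+1; left -= 1; right += 1 else break
def eacLoop (cs : List Char) (n left right ans : Int) : Int :=
  if _h : -1 < left ∧ right < n then
    match PySem.List.pyGet? cs left, PySem.List.pyGet? cs right with
    | some a, some b =>
        if a == b then eacLoop cs n (left - 1) (right + 1) (right - left + 1) else ans
    | _, _ => ans   -- Python raises IndexError here; excluded by Pre_
  else ans
termination_by (left + 1).toNat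
decreasing_by omega

def expandAroundCenter (s : String) (n : Int) (left : Int) (right : Int) : Int :=
  eacLoop s.toList n left right 0

-- ===== PORT B =====
-- s[left-j] == s[right+j]  (Python indexing: a negative index counts from the end)
def pairOK (cs : List Char) (left right j : Int) : Bool :=
  PySem.List.pyGet? cs (left - j) == PySem.List.pyGet? cs (right + j)

-- for r in range(rmax, -1, -1): if all(s[left-j]==s[right+j] for j in range(r+1)): return right-left+1+2*r
def eacAltLoop (cs : List Char) (left right r : Int) : Int :=
  if _h : 0 ≤ r then
    if (PySem.List.pyRange 0 (r + 1) 1).all (pairOK cs left right) then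
      right - left + 1 + 2 * r
    else eacAltLoop cs left right (r - 1)
  else 0
termination_by (r + 1).toNat
decreasing_by omega

def expandAroundCenter_alt (s : String) (n : Int) (left : Int) (right : Int) : Int :=
  if left < 0 ∨ n ≤ right then 0
  else eacAltLoop s.toList left right (min left (n - 1 - right))

-- ===== PRECONDITION & SPEC =====
-- Pre_ excludes the inputs on which A's loop can raise IndexError (it reaches an index outside
-- [-len(s), len(s))); because raising depends on string contents once n > len(s), Pre_
-- conservatively requires n ≤ len(s), left < len(s) and -len(s) ≤ right whenever the loop is
-- entered, which also excludes some inputs with n > len(s) on which A stops early and returns.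
def Pre_expandAroundCenter (s : String) (n : Int) (left : Int) (right : Int) : Prop :=
  (left < 0 ∨ n ≤ right) ∨
  (n ≤ (s.toList.length : Int) ∧ left < (s.toList.length : Int) ∧ -(s.toList.length : Int) ≤ right)
instance (s : String) (n : Int) (left : Int) (right : Int) : Decidable (Pre_expandAroundCenter s n left right) := by
  unfold Pre_expandAroundCenter; infer_instance

def pvWitness_expandAroundCenter : String × Int × Int × Int := ("aba", 3, 1, 1)

def Spec_expandAroundCenter (s : String) (n : Int) (left : Int) (right : Int) (out : Int) : Prop := out = expandAroundCenter_alt s n left right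
instance (s : String) (n : Int) (left : Int) (right : Int) (out : Int) : Decidable (Spec_expandAroundCenter s n left right out) := by unfold Spec_expandAroundCenter; infer_instance

-- ===== CLAIM (what is proved, stated in full; the proofs are below) =====
def Claim_equal_expandAroundCenter : Prop := ∀ (s : String) (n : Int) (left : Int) (right : Int), Dom_expandAroundCenter s n left right → Pre_expandAroundCenter s n left right → Spec_expandAroundCenter s n left right (expandAroundCenter s n left right)

-- ===== LEMMAS AND PROOFS =====

-- number of successful expansion steps of A's loop
def steps (cs : List Char) (n left right : Int) : Nat :=
  if _h : -1 < left ∧ right < n then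
    match PySem.List.pyGet? cs left, PySem.List.pyGet? cs right with
    | some a, some b => if a == b then steps cs n (left - 1) (right + 1) + 1 else 0
    | _, _ => 0
  else 0
termination_by (left + 1).toNat
decreasing_by omega

-- A's loop in terms of steps
lemma eacLoop_eq_steps (cs : List Char) (n left right ans : Int) :
    eacLoop cs n left right ans =
      if steps cs n left right = 0 then ans
      else right - left + 1 + 2 * ((steps cs n left right : Int) - 1) := by
  fun_induction eacLoop with
  | case1 left right ans h a b hget1 hget2 heq ih =>
      rw [steps]
      simp only [h, hget1, hget2, heq, if_pos]
      rw [ih]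
      by_cases hs : steps cs n (left - 1) (right + 1) = 0 <;> simp [hs] <;> push_cast <;> omega
  | case2 left right ans h a b hget1 hget2 heq =>
      rw [steps]
      simp only [h, hget1, hget2, heq]
      simp
  | case3 left right ans h hm =>
      rw [steps]
      simp only [h]
      split <;> simp_all
  | case4 left right ans h =>
      rw [steps]; simp [h]

lemma steps_le (cs : List Char) (n left right : Int) :
    (steps cs n left right : Int) ≤ max (left + 1) 0 ∧
    (steps cs n left right : Int) ≤ max (n - right) 0 := by
  fun_induction steps <;> push_cast <;> omega

lemma pairOK_shift (cs : List Char) (left right j : Int) :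
    pairOK cs (left - 1) (right + 1) j = pairOK cs left right (j + 1) := by
  simp only [pairOK]
  have h1 : left - 1 - j = left - (j + 1) := by ring
  have h2 : right + 1 + j = right + (j + 1) := by ring
  rw [h1, h2]

lemma pyGet?_isSome (cs : List Char) (i : Int) (h1 : -(cs.length : Int) ≤ i)
    (h2 : i < (cs.length : Int)) : ∃ a, PySem.List.pyGet? cs i = some a := by
  cases hg : PySem.List.pyGet? cs i with
  | none =>
      rw [PySem.List.pyGet?_eq_none_iff] at hg
      exact absurd ⟨h1, h2⟩ hg
  | some a => exact ⟨a, rfl⟩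

-- the loop ran k+1 or more steps iff the first k+1 symmetric character pairs all match
lemma steps_ge_iff (cs : List Char) (n : Int) : ∀ (k : Nat) (left right : Int),
    0 ≤ left → left < (cs.length : Int) → (k : Int) ≤ left → right + k < n →
    n ≤ (cs.length : Int) → -(cs.length : Int) ≤ right →
    (k + 1 ≤ steps cs n left right ↔
      ∀ j : Int, 0 ≤ j → j ≤ (k : Int) → pairOK cs left right j = true) := by
  intro k
  induction k with
  | zero =>
      intro left right h0 hl hk hrk hn hr
      obtain ⟨a, ha⟩ := pyGet?_isSome cs left (by omega) hl
      obtain ⟨b, hb⟩ := pyGet?_isSome cs right hr (by omega)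
      have hcond : -1 < left ∧ right < n := ⟨by omega, by omega⟩
      rw [steps, dif_pos hcond]
      simp only [ha, hb]
      constructor
      · intro h j hj0 hj1
        have hj : j = 0 := by push_cast at hj1; omega
        subst hj
        simp only [pairOK, sub_zero, add_zero, ha, hb]
        by_cases hab : (a == b) = true
        · simpa using hab
        · simp [hab] at h
      · intro h
        have h0Q := h 0 le_rfl (by simp)
        simp only [pairOK, sub_zero, add_zero, ha, hb] at h0Q
        have hab : a = b := by simpa using h0Q
        simp [hab]
  | succ k ih =>
      intro left right h0 hl hk hrk hn hr
      obtain ⟨a, ha⟩ := pyGet?_isSome cs left (by omega) hl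
      obtain ⟨b, hb⟩ := pyGet?_isSome cs right hr (by omega)
      have hcond : -1 < left ∧ right < n := ⟨by omega, by omega⟩
      rw [steps, dif_pos hcond]
      simp only [ha, hb]
      have hP0 : pairOK cs left right 0 = (a == b) := by
        simp [pairOK, ha, hb]
      by_cases hab : a == b
      · simp only [hab, if_pos]
        have hIH := ih (left - 1) (right + 1) (by push_cast at hk ⊢; omega)
          (by omega) (by push_cast at hk ⊢; omega) (by push_cast at hrk ⊢; omega) hn (by omega)
        constructor
        · intro h j hj0 hjk
          by_cases hj : j = 0
          · subst hj; simp [hP0, hab]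
          · have : k + 1 ≤ steps cs n (left - 1) (right + 1) := by omega
            have := (hIH.mp this) (j - 1) (by omega) (by push_cast at hjk ⊢; omega)
            rwa [pairOK_shift, sub_add_cancel] at this
        · intro h
          have : ∀ j : Int, 0 ≤ j → j ≤ (k : Int) → pairOK cs (left - 1) (right + 1) j = true := by
            intro j hj0 hjk
            rw [pairOK_shift]
            exact h (j + 1) (by omega) (by push_cast; omega)
          have := hIH.mpr this
          omega
      · simp only [hab, if_neg, Bool.false_eq_true, not_false_eq_true]
        constructor
        · omega
        · intro h
          have := h 0 le_rfl (by positivity)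
          rw [hP0] at this
          exact absurd this (by simpa using hab)

-- B's descending radius search computed in terms of steps
lemma eacAltLoop_eq (cs : List Char) (n left right : Int)
    (h0 : 0 ≤ left) (hl : left < (cs.length : Int)) (hn : n ≤ (cs.length : Int))
    (hr : -(cs.length : Int) ≤ right) :
    ∀ (m : Nat) (r : Int), r + 1 ≤ (m : Int) → r ≤ left → right + r < n →
    (steps cs n left right : Int) ≤ r + 1 →
    eacAltLoop cs left right r =
      if steps cs n left right = 0 then 0
      else right - left + 1 + 2 * ((steps cs n left right : Int) - 1) := by
  intro m
  induction m with
  | zero =>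
      intro r h1 _ _ hs
      rw [eacAltLoop, dif_neg (by push_cast at h1; omega)]
      have h2 : steps cs n left right = 0 := by push_cast at h1; omega
      simp [h2]
  | succ m ih =>
      intro r h1 hrl hrn hs
      by_cases hr0 : 0 ≤ r
      · rw [eacAltLoop, dif_pos hr0]
        have hiff := steps_ge_iff cs n r.toNat left right h0 hl
          (by rw [Int.toNat_of_nonneg hr0]; exact hrl)
          (by rw [Int.toNat_of_nonneg hr0]; exact hrn) hn hr
        rw [Int.toNat_of_nonneg hr0] at hiff
        have hAll : ((PySem.List.pyRange 0 (r + 1) 1).all (pairOK cs left right) = true) ↔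
            (∀ j : Int, 0 ≤ j → j ≤ r → pairOK cs left right j = true) := by
          rw [List.all_eq_true]
          constructor
          · intro h j hj0 hj1
            exact h j (by rw [PySem.List.mem_pyRange_one]; omega)
          · intro h j hj
            rw [PySem.List.mem_pyRange_one] at hj
            exact h j hj.1 (by omega)
        by_cases hA : (PySem.List.pyRange 0 (r + 1) 1).all (pairOK cs left right) = true
        · rw [if_pos hA]
          have hge : r.toNat + 1 ≤ steps cs n left right := hiff.mpr (hAll.mp hA)
          have hS : (steps cs n left right : Int) = r + 1 := by
            have := Int.toNat_of_nonneg hr0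
            push_cast at hge ⊢
            omega
          rw [if_neg (by omega), hS]
          ring
        · rw [if_neg hA]
          have hlt : ¬ (r.toNat + 1 ≤ steps cs n left right) := fun h => hA (hAll.mpr (hiff.mp h))
          have hS : (steps cs n left right : Int) ≤ r := by
            have := Int.toNat_of_nonneg hr0
            push_cast at hlt ⊢
            omega
          exact ih (r - 1) (by push_cast at h1 ⊢; omega) (by omega) (by omega) (by omega)
      · rw [eacAltLoop, dif_neg hr0]
        have h2 : steps cs n left right = 0 := by omega
        simp [h2]

-- ===== VERDICT (by name: the statement is the Claim_ definition above) =====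
theorem expandAroundCenter_spec : Claim_equal_expandAroundCenter := by
  intro s n left right _hDom hPre
  unfold Spec_expandAroundCenter
  unfold expandAroundCenter expandAroundCenter_alt
  rw [eacLoop_eq_steps]
  by_cases hcase : left < 0 ∨ n ≤ right
  · rw [if_pos hcase]
    have h2 : steps s.toList n left right = 0 := by
      rw [steps, dif_neg (by omega)]
    simp [h2]
  · rw [if_neg hcase]
    push_neg at hcase
    obtain ⟨hn, hl, hr⟩ : n ≤ (s.toList.length : Int) ∧ left < (s.toList.length : Int) ∧
        -(s.toList.length : Int) ≤ right := by
      rcases hPre with h | h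
      · exact absurd h (by omega)
      · exact h
    have hle := steps_le s.toList n left right
    exact (eacAltLoop_eq s.toList n left right (by omega) hl hn hr
      (min left (n - 1 - right) + 1).toNat (min left (n - 1 - right))
      (by omega) (by omega) (by omega) (by omega)).symm
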